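-- pv_equiv track=rewrite | github.com/haimbar/RNA_lexis | src/rna_lexis/alignment.py | make_markers
-- ===== SOURCE A (Python) =====
-- from typing import Tuple
--
-- def make_markers(aligned_a: str, aligned_b: str) -> Tuple[str, int, int, int]:
--     """Build an alignment marker string and summary counts.
--
--     For each aligned column:
--     * ``'|'`` — exact match
--     * ``'.'`` — mismatch (both characters are non-gap)
--     * ``' '`` — at least one side is a gap (``'-'``)
--
--     Args:
--         aligned_a: First aligned sequence (may contain ``'-'`` for gaps).
--         aligned_b: Second aligned sequence (same length as aligned_a).
--
--     Returns:
--         Tuple (markers, matches, mismatches, gaps) where markers is the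
--         column-by-column symbol string and the counts sum to len(aligned_a).
--     """
--     marks = []
--     matches = mismatches = gaps = 0
--     for ca, cb in zip(aligned_a, aligned_b):
--         if ca == "-" or cb == "-":
--             marks.append(" ")
--             gaps += 1
--         elif ca == cb:
--             marks.append("|")
--             matches += 1
--         else:
--             marks.append(".")
--             mismatches += 1
--     return "".join(marks), matches, mismatches, gaps
-- ===== SOURCE B (Python) =====
-- def make_markers(aligned_a, aligned_b):
--     n = min(len(aligned_a), len(aligned_b))
--     a = aligned_a[:n]
--     b = aligned_b[:n]
--     pairs = list(zip(a, b))
--     # stage 1: match/mismatch markers, ignoring gaps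
--     stage1 = ['|' if x == y else '.' for x, y in pairs]
--     # stage 2: stamp gap columns over the stage-1 markers
--     markers = ''.join(' ' if x == '-' or y == '-' else m
--                       for (x, y), m in zip(pairs, stage1))
--     # counts by inclusion-exclusion, not by classifying columns
--     both = sum(1 for x, y in pairs if x == '-' and y == '-')
--     gaps = a.count('-') + b.count('-') - both
--     matches = stage1.count('|') - both
--     mismatches = n - gaps - matches
--     return markers, matches, mismatches, gaps
-- ===== Notes on version B (the rewrite author's own statement) =====
-- stated objective: alternative
-- what changed: Replaces A's single fused if/elif loop carrying four counters by a two-stage marker construction (match/mismatch markers first, then gap columns stamped over them) with all three counts derived by inclusion-exclusion from per-string '-' counts and the stage-1 marker count instead of per-column classification.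
import Mathlib
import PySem

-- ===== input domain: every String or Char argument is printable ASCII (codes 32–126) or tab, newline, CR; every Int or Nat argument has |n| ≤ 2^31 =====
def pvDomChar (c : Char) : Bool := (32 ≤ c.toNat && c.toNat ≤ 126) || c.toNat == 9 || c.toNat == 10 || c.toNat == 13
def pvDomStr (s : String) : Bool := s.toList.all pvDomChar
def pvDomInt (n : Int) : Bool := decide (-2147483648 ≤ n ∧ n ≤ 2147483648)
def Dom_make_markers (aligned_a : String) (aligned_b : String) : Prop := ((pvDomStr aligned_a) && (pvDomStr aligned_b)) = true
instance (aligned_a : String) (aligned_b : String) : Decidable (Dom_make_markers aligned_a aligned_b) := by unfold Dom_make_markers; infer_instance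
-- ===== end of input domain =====

-- B builds match/mismatch markers first, stamps gap columns over them, and derives the
-- counts by inclusion-exclusion from per-string '-' counts; A fuses everything into one
-- classifying loop with four accumulators. Objective: alternative.

-- ===== PORT A =====
-- transliteration of A's single loop over zip carrying (marks, matches, mismatches, gaps)
def make_markers (aligned_a : String) (aligned_b : String) : String × Int × Int × Int :=
  let st := (aligned_a.toList.zip aligned_b.toList).foldl
    (fun (acc : List Char × Int × Int × Int) cc =>
      if cc.1 = '-' ∨ cc.2 = '-' then (acc.1 ++ [' '], acc.2.1, acc.2.2.1, acc.2.2.2 + 1)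
      else if cc.1 = cc.2 then (acc.1 ++ ['|'], acc.2.1 + 1, acc.2.2.1, acc.2.2.2)
      else (acc.1 ++ ['.'], acc.2.1, acc.2.2.1 + 1, acc.2.2.2))
    ([], 0, 0, 0)
  (String.ofList st.1, st.2.1, st.2.2.1, st.2.2.2)

-- ===== PORT B =====
def pvStage1 (cc : Char × Char) : Char := if cc.1 = cc.2 then '|' else '.'
def pvStamp (p : (Char × Char) × Char) : Char := if p.1.1 = '-' ∨ p.1.2 = '-' then ' ' else p.2

-- aligned_a[:n] with 0 ≤ n ≤ len is exactly List.take n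
def make_markers_alt (aligned_a : String) (aligned_b : String) : String × Int × Int × Int :=
  let n := min aligned_a.toList.length aligned_b.toList.length
  let a := aligned_a.toList.take n
  let b := aligned_b.toList.take n
  let pairs := a.zip b
  let stage1 := pairs.map pvStage1
  let markers := (pairs.zip stage1).map pvStamp
  let both : Int := ((pairs.filter (fun cc => cc.1 = '-' ∧ cc.2 = '-')).length : Int)
  let gaps : Int := (a.count '-' : Int) + (b.count '-' : Int) - both
  let mtch : Int := (stage1.count '|' : Int) - both
  (String.ofList markers, mtch, (n : Int) - gaps - mtch, gaps)

-- ===== PRECONDITION & SPEC =====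
def Spec_make_markers (aligned_a : String) (aligned_b : String) (out : String × Int × Int × Int) : Prop := out = make_markers_alt aligned_a aligned_b
instance (aligned_a : String) (aligned_b : String) (out : String × Int × Int × Int) : Decidable (Spec_make_markers aligned_a aligned_b out) := by unfold Spec_make_markers; infer_instance

-- ===== CLAIM (what is proved, stated in full; the proofs are below) =====
def Claim_equal_make_markers : Prop := ∀ (aligned_a : String) (aligned_b : String), Dom_make_markers aligned_a aligned_b → Spec_make_markers aligned_a aligned_b (make_markers aligned_a aligned_b)

-- ===== LEMMAS AND PROOFS =====
def pvMark (cc : Char × Char) : Char :=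
  if cc.1 = '-' ∨ cc.2 = '-' then ' ' else if cc.1 = cc.2 then '|' else '.'

theorem make_markers_loop (l : List (Char × Char)) (marks : List Char) (m mm g : Int) :
    l.foldl
      (fun (acc : List Char × Int × Int × Int) cc =>
        if cc.1 = '-' ∨ cc.2 = '-' then (acc.1 ++ [' '], acc.2.1, acc.2.2.1, acc.2.2.2 + 1)
        else if cc.1 = cc.2 then (acc.1 ++ ['|'], acc.2.1 + 1, acc.2.2.1, acc.2.2.2)
        else (acc.1 ++ ['.'], acc.2.1, acc.2.2.1 + 1, acc.2.2.2))
      (marks, m, mm, g)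
    = (marks ++ l.map pvMark,
       m + ((l.map pvMark).count '|' : Int),
       mm + ((l.map pvMark).count '.' : Int),
       g + ((l.map pvMark).count ' ' : Int)) := by
  induction l generalizing marks m mm g with
  | nil => simp
  | cons cc t ih =>
    by_cases h1 : cc.1 = '-' ∨ cc.2 = '-'
    · simp only [List.foldl_cons, ih, List.map_cons, pvMark, if_pos h1,
        List.count_cons, Prod.mk.injEq]
      refine ⟨by simp, ?_, ?_, ?_⟩ <;> (simp; try ring)
    · by_cases h2 : cc.1 = cc.2
      · simp only [List.foldl_cons, ih, List.map_cons, pvMark,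
          if_neg h1, if_pos h2, List.count_cons, Prod.mk.injEq]
        refine ⟨by simp, ?_, ?_, ?_⟩ <;> (simp; try ring)
      · simp only [List.foldl_cons, ih, List.map_cons, pvMark,
          if_neg h1, if_neg h2, List.count_cons, Prod.mk.injEq]
        refine ⟨by simp, ?_, ?_, ?_⟩ <;> (simp; try ring)

-- B's two-stage marker build equals the one-pass classification
theorem stamp_eq_mark (p : List (Char × Char)) :
    (p.zip (p.map pvStage1)).map pvStamp = p.map pvMark := by
  induction p with
  | nil => rfl
  | cons cc t ih =>
    simp only [List.map_cons, List.zip_cons_cons, ih, List.cons.injEq, and_true]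
    by_cases h1 : cc.1 = '-' ∨ cc.2 = '-' <;> by_cases h2 : cc.1 = cc.2 <;>
      simp [pvStamp, pvStage1, pvMark, h1, h2]

-- B's inclusion-exclusion counts equal the column-classification counts (Nat form)
theorem counts_lemma (p : List (Char × Char)) :
    ((p.map pvMark).count '|' + (p.filter (fun cc => cc.1 = '-' ∧ cc.2 = '-')).length
       = (p.map pvStage1).count '|')
    ∧ ((p.map pvMark).count ' ' + (p.filter (fun cc => cc.1 = '-' ∧ cc.2 = '-')).length
       = (p.map Prod.fst).count '-' + (p.map Prod.snd).count '-')
    ∧ ((p.map pvMark).count '|' + (p.map pvMark).count '.' + (p.map pvMark).count ' '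
       = p.length) := by
  induction p with
  | nil => simp
  | cons cc t ih =>
    obtain ⟨ih1, ih2, ih3⟩ := ih
    obtain ⟨x, y⟩ := cc
    by_cases hx : x = '-' <;> by_cases hy : y = '-' <;> by_cases hxy : x = y <;>
      simp_all [pvMark, pvStage1] <;> omega

theorem zip_take_min (x y : List Char) :
    (x.take (min x.length y.length)).zip (y.take (min x.length y.length)) = x.zip y := by
  induction x generalizing y with
  | nil => simp
  | cons hd tl ih =>
    cases y with
    | nil => simp
    | cons h2 t2 => simp [ih, Nat.succ_min_succ]

theorem map_fst_zip_take (x y : List Char) :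
    (x.zip y).map Prod.fst = x.take (min x.length y.length) := by
  induction x generalizing y with
  | nil => simp
  | cons hd tl ih =>
    cases y with
    | nil => simp
    | cons h2 t2 => simp [ih, Nat.succ_min_succ]

theorem map_snd_zip_take (x y : List Char) :
    (x.zip y).map Prod.snd = y.take (min x.length y.length) := by
  induction x generalizing y with
  | nil => simp
  | cons hd tl ih =>
    cases y with
    | nil => simp
    | cons h2 t2 => simp [ih, Nat.succ_min_succ]

-- ===== VERDICT (by name: the statement is the Claim_ definition above) =====
theorem make_markers_spec : Claim_equal_make_markers := by
  intro a b _
  simp only [Spec_make_markers, make_markers, make_markers_alt, make_markers_loop,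
    List.nil_append, zip_take_min, zero_add, stamp_eq_mark, Prod.mk.injEq]
  simp only [← map_fst_zip_take, ← map_snd_zip_take]
  obtain ⟨h1, h2, h3⟩ := counts_lemma (a.toList.zip b.toList)
  have hlen : (a.toList.zip b.toList).length = min a.toList.length b.toList.length := by
    simp
  refine ⟨trivial, ?_, ?_, ?_⟩ <;> push_cast <;> omega
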